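-- pv_equiv track=rewrite | github.com/giangduong36/2048-Bot | Grid.py | mergeTiles
-- ===== SOURCE A (Python) =====
-- def mergeTiles(tiles):
--     """Merge a list of tiles. If two adjacent tiles are equal in values, they are merged together"""
--     if len(tiles) <= 1:
--         return tiles
--     i = 0
--     while i < len(tiles) - 1:
--         if tiles[i] == tiles[i + 1]:
--             tiles[i] *= 2
--             del tiles[i + 1]
--         i += 1
--     return tiles
-- ===== SOURCE B (Python) =====
-- def mergeTiles(tiles):
--     """Merge a list of tiles by run-length scanning: for each maximal run of
--     k equal tiles with value v, emit k//2 merged tiles (v*2) followed by the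
--     k%2 leftover v. Mutates tiles in place (like the original) and returns it."""
--     result = []
--     n = len(tiles)
--     i = 0
--     while i < n:
--         j = i
--         while j < n and tiles[j] == tiles[i]:
--             j += 1
--         k = j - i
--         result += [tiles[i] * 2] * (k // 2) + [tiles[i]] * (k % 2)
--         i = j
--     tiles[:] = result
--     return tiles
-- ===== Notes on version B (the rewrite author's own statement) =====
-- stated objective: alternative
-- what changed: B replaces A's per-pair in-place merge-and-delete scan (with quadratic del shifting) by a run-length pass: it finds each maximal run of k equal tiles with two indices and emits k//2 doubled tiles plus k%2 leftover arithmetically, then assigns tiles[:] = result.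
import Mathlib
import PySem

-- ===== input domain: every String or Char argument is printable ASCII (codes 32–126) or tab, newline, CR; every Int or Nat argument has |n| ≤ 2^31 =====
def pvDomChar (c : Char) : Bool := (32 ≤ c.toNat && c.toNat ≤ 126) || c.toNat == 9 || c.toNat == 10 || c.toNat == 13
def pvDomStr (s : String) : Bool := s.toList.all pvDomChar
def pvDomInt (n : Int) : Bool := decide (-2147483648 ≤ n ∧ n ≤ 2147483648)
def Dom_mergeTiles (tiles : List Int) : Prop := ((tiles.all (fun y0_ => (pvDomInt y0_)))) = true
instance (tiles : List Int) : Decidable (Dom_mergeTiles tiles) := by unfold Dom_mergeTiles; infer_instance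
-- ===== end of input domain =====

-- B replaces A's per-pair merge-and-delete scan by a run-length pass; both Pythons mutate the
-- argument list in place and return it, so the proved equivalence is about the returned value.

-- ===== PORT A =====
-- A's while loop: i steps forward; a merge doubles tiles[i] and deletes tiles[i+1].
-- The loop guard keeps i and i+1 in range, so getD 0 is exact for Python's tiles[i].
def mergeLoopA (tiles : List Int) (i : Nat) : List Int :=
  if h : i < tiles.length - 1 then
    if tiles.getD i 0 = tiles.getD (i + 1) 0 then
      mergeLoopA ((tiles.set i (2 * tiles.getD i 0)).eraseIdx (i + 1)) (i + 1)
    else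
      mergeLoopA tiles (i + 1)
  else
    tiles
termination_by tiles.length - i
decreasing_by
  · simp only [List.length_eraseIdx, List.length_set]; split <;> omega
  · omega

def mergeTiles (tiles : List Int) : List Int :=
  if tiles.length ≤ 1 then tiles else mergeLoopA tiles 0

-- ===== PORT B =====
-- inner while of Source B: length of the leading run of elements equal to v
def runLen (v : Int) : List Int → Nat
  | [] => 0
  | x :: xs => if x = v then runLen v xs + 1 else 0

-- outer while of Source B: per maximal run of k equal tiles emit k//2 doubled tiles
-- and k%2 leftovers, then jump past the run
def mergeRuns (l : List Int) : List Int :=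
  match l with
  | [] => []
  | x :: xs =>
    let k := runLen x xs + 1
    List.replicate (k / 2) (x * 2) ++ List.replicate (k % 2) x ++ mergeRuns (xs.drop (k - 1))
termination_by l.length
decreasing_by simp only [List.length_drop, List.length_cons]; omega

def mergeTiles_alt (tiles : List Int) : List Int := mergeRuns tiles

-- ===== PRECONDITION & SPEC =====
def Spec_mergeTiles (tiles : List Int) (out : List Int) : Prop := out = mergeTiles_alt tiles
instance (tiles : List Int) (out : List Int) : Decidable (Spec_mergeTiles tiles out) := by unfold Spec_mergeTiles; infer_instance

-- ===== CLAIM (what is proved, stated in full; the proofs are below) =====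
def Claim_equal_mergeTiles : Prop := ∀ (tiles : List Int), Dom_mergeTiles tiles → Spec_mergeTiles tiles (mergeTiles tiles)

-- ===== LEMMAS AND PROOFS =====

-- common reference: one left-to-right adjacent-merge pass
def pvSpec : List Int → List Int
  | [] => []
  | [x] => [x]
  | x :: y :: r => if x = y then (2 * x) :: pvSpec r else x :: pvSpec (y :: r)

lemma mergeRuns_nil : mergeRuns [] = [] := by
  rw [mergeRuns]

lemma mergeRuns_cons (x : Int) (xs : List Int) :
    mergeRuns (x :: xs) = List.replicate ((runLen x xs + 1) / 2) (x * 2) ++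
      List.replicate ((runLen x xs + 1) % 2) x ++ mergeRuns (xs.drop (runLen x xs + 1 - 1)) := by
  rw [mergeRuns]

lemma pv_getD1 : ∀ (d : List Int) (x : Int) (r : List Int),
    (d ++ x :: r).getD d.length 0 = x := by
  intro d
  induction d with
  | nil => simp
  | cons a d ih => intro x r; simp only [List.cons_append, List.length_cons, List.getD_cons_succ]; exact ih x r

lemma pv_getD2 : ∀ (d : List Int) (x y : Int) (r : List Int),
    (d ++ x :: y :: r).getD (d.length + 1) 0 = y := by
  intro d
  induction d with
  | nil => simp
  | cons a d ih => intro x y r; simp only [List.cons_append, List.length_cons, List.getD_cons_succ]; exact ih x y r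

lemma pv_setL : ∀ (d : List Int) (x v : Int) (r : List Int),
    (d ++ x :: r).set d.length v = d ++ v :: r := by
  intro d
  induction d with
  | nil => simp
  | cons a d ih => intro x v r; simp [ih]

lemma pv_eraseL : ∀ (d : List Int) (a y : Int) (r : List Int),
    (d ++ a :: y :: r).eraseIdx (d.length + 1) = d ++ a :: r := by
  intro d
  induction d with
  | nil => simp
  | cons b d ih => intro a y r; simp [ih]

lemma pv_loopA_spec : ∀ (n : Nat) (rest done : List Int), rest.length ≤ n →
    mergeLoopA (done ++ rest) done.length = done ++ pvSpec rest := by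
  intro n
  induction n with
  | zero =>
    intro rest done h
    have hr : rest = [] := List.eq_nil_of_length_eq_zero (Nat.le_zero.mp h)
    subst hr
    rw [mergeLoopA, dif_neg (by simp only [List.append_nil]; omega)]
    simp [pvSpec]
  | succ n ih =>
    intro rest done h
    match rest with
    | [] =>
      rw [mergeLoopA, dif_neg (by simp only [List.append_nil]; omega)]
      simp [pvSpec]
    | [x] =>
      rw [mergeLoopA,
        dif_neg (by simp only [List.length_append, List.length_cons, List.length_nil]; omega)]
      simp [pvSpec]
    | x :: y :: r =>
      have hc : done.length < (done ++ x :: y :: r).length - 1 := by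
        simp only [List.length_append, List.length_cons]; omega
      rw [mergeLoopA, dif_pos hc, pv_getD1, pv_getD2]
      by_cases hxy : x = y
      · subst hxy
        rw [if_pos rfl, pv_setL, pv_eraseL]
        have h1 : done ++ 2 * x :: r = (done ++ [2 * x]) ++ r := by simp
        have h2 : done.length + 1 = (done ++ [2 * x]).length := by simp
        rw [h1, h2, ih r (done ++ [2 * x]) (by simp only [List.length_cons] at h; omega)]
        simp [pvSpec]
      · rw [if_neg hxy]
        have h1 : done ++ x :: y :: r = (done ++ [x]) ++ y :: r := by simp
        have h2 : done.length + 1 = (done ++ [x]).length := by simp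
        rw [h1, h2, ih (y :: r) (done ++ [x]) (by simp only [List.length_cons] at h ⊢; omega)]
        simp [pvSpec, hxy]

lemma pv_A_eq_spec (tiles : List Int) : mergeTiles tiles = pvSpec tiles := by
  unfold mergeTiles
  by_cases h : tiles.length ≤ 1
  · rw [if_pos h]
    match tiles, h with
    | [], _ => rfl
    | [x], _ => rfl
    | x :: y :: r, h => simp at h
  · rw [if_neg h]
    have := pv_loopA_spec tiles.length tiles [] (le_refl _)
    simpa using this

lemma pv_run_split : ∀ (x : Int) (t : List Int),
    mergeRuns t = List.replicate (runLen x t / 2) (x * 2) ++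
      List.replicate (runLen x t % 2) x ++ mergeRuns (t.drop (runLen x t)) := by
  intro x t
  match t with
  | [] => simp [mergeRuns_nil, runLen]
  | z :: t' =>
    by_cases hz : z = x
    · subst hz
      have hrl : runLen z (z :: t') = runLen z t' + 1 := by simp [runLen]
      rw [mergeRuns_cons, hrl, Nat.add_sub_cancel, List.drop_succ_cons]
    · have h0 : runLen x (z :: t') = 0 := by simp [runLen, hz]
      rw [h0]
      simp

lemma pv_B_eq_spec : ∀ (n : Nat) (l : List Int), l.length ≤ n → mergeRuns l = pvSpec l := by
  intro n
  induction n with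
  | zero =>
    intro l h
    have hl : l = [] := List.eq_nil_of_length_eq_zero (Nat.le_zero.mp h)
    subst hl
    simp [mergeRuns_nil, pvSpec]
  | succ n ih =>
    intro l h
    match l with
    | [] => simp [mergeRuns_nil, pvSpec]
    | [x] => simp [mergeRuns_cons, mergeRuns_nil, runLen, pvSpec]
    | x :: y :: r =>
      by_cases hxy : x = y
      · subst hxy
        have hrl : runLen x (x :: r) = runLen x r + 1 := by simp [runLen]
        rw [mergeRuns_cons, hrl]
        have h2 : (runLen x r + 1 + 1) / 2 = runLen x r / 2 + 1 := by omega
        have h3 : (runLen x r + 1 + 1) % 2 = runLen x r % 2 := by omega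
        have h4 : runLen x r + 1 + 1 - 1 = runLen x r + 1 := by omega
        rw [h2, h3, h4, List.drop_succ_cons, List.replicate_succ]
        simp only [List.cons_append]
        rw [← pv_run_split x r, ih r (by simp only [List.length_cons] at h; omega)]
        simp [pvSpec, mul_comm]
      · have h0 : runLen x (y :: r) = 0 := by
          simp only [runLen]; rw [if_neg (fun hyx => hxy hyx.symm)]
        rw [mergeRuns_cons, h0]
        have hih := ih (y :: r) (by simp only [List.length_cons] at h ⊢; omega)
        simp [pvSpec, hxy, hih]

-- ===== VERDICT (by name: the statement is the Claim_ definition above) =====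
theorem mergeTiles_spec : Claim_equal_mergeTiles := by
  intro tiles _
  show mergeTiles tiles = mergeTiles_alt tiles
  rw [pv_A_eq_spec]
  unfold mergeTiles_alt
  rw [pv_B_eq_spec tiles.length tiles (le_refl _)]
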